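-- pv_equiv track=rewrite | github.com/thehalleyyoung/deppy | tests/test_equivalence/test_hard_eq_pairs.py | eq13a
-- ===== SOURCE A (Python) =====
-- from collections import defaultdict, Counter, deque, OrderedDict
--
-- def eq13a(edges, source, sink, threshold):
--     """DFS backtracking."""
--     adj = defaultdict(list)
--     for u, v, w in edges:
--         adj[u].append((v, w))
--     count = [0]
--     path = set()
--
--     def _dfs(u, weight):
--         if weight >= threshold:
--             return
--         if u == sink:
--             count[0] += 1
--             return
--         path.add(u)
--         for v, w in adj[u]:
--             if v not in path:
--                 _dfs(v, weight + w)
--         path.remove(u)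
--
--     _dfs(source, 0)
--     return count[0]
-- ===== SOURCE B (Python) =====
-- def eq13a(edges, source, sink, threshold):
--     """Level-synchronous BFS over generations of path frames; no adjacency
--     index — each frame's successors are found by scanning the edge list."""
--     count = 0
--     frontier = [(source, 0, frozenset())]
--     while frontier:
--         live = [(u, w, vis) for (u, w, vis) in frontier if w < threshold]
--         count += sum(1 for (u, _, _) in live if u == sink)
--         frontier = [(v, w + wt, vis | {u})
--                     for (u, w, vis) in live if u != sink
--                     for (x, v, wt) in edges
--                     if x == u and v not in vis and v != u]
--     return count
-- ===== Notes on version B (the rewrite author's own statement) =====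
-- stated objective: alternative
-- what changed: Replaces the recursive DFS (adjacency dict, one shared mutable path set, backtracking add/remove) with a level-synchronous breadth-first frontier loop: each generation filters live frames, counts sink arrivals, and expands frames by scanning the raw edge list with per-frame frozensets, with no adjacency index at all.
import Mathlib
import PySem

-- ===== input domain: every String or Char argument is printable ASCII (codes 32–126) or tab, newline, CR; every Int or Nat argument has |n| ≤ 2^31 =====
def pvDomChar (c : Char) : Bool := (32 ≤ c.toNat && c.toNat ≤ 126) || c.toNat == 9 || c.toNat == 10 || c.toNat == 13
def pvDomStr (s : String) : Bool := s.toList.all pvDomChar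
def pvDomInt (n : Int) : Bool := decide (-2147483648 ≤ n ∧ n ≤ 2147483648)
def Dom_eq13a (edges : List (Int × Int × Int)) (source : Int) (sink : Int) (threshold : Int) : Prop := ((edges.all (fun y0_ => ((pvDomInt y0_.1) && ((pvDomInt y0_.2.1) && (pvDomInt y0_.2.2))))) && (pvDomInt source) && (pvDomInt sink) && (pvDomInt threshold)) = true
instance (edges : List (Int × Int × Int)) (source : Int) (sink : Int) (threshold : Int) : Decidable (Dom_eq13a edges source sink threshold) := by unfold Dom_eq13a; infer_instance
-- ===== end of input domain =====

-- B replaces A's recursive backtracking DFS (adjacency dict + shared mutable path set) by a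
-- level-synchronous frontier loop over per-frame frozensets that scans the raw edge list;
-- same return value, alternative structure (no adjacency index, breadth-first order).

-- ===== PORT A =====
-- adj = defaultdict(list); for u, v, w in edges: adj[u].append((v, w))
def pvAdjA (edges : List (Int × Int × Int)) : PySem.Dict Int (List (Int × Int)) :=
  edges.foldl (fun d e => d.modify e.1 [] (fun l => l ++ [(e.2.1, e.2.2)])) PySem.Dict.empty

-- _dfs, returning the total added to count[0]; `path` is restored after each call, so it is passed
-- as a value.  The Nat fuel only makes the recursion total: the Python recursion depth is bounded
-- by the number of distinct path nodes (≤ edges.length + 1), so fuel edges.length + 2 never runs out.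
def pvDfsA (adj : PySem.Dict Int (List (Int × Int))) (sink threshold : Int) :
    Nat → Int → Int → PySem.Set Int → Int
  | 0, _, _, _ => 0
  | fuel + 1, u, weight, path =>
    if threshold ≤ weight then 0
    else if u = sink then 1
    else
      let path' := PySem.Set.add path u
      (adj.getD u []).foldl
        (fun acc vw =>
          if PySem.Set.contains path' vw.1 then acc
          else acc + pvDfsA adj sink threshold fuel vw.1 (weight + vw.2) path') 0

def eq13a (edges : List (Int × Int × Int)) (source : Int) (sink : Int) (threshold : Int) : Int :=
  pvDfsA (pvAdjA edges) sink threshold (edges.length + 2) source 0 PySem.Set.empty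

-- ===== PORT B =====
-- One frame = (node, accumulated weight, frozenset of nodes already on the path).
-- live = [(u, w, vis) for (u, w, vis) in frontier if w < threshold]
-- next frontier = [(v, w+wt, vis | {u}) for (u,w,vis) in live if u != sink
--                  for (x,v,wt) in edges if x == u and v not in vis and v != u]
def pvExpandB (edges : List (Int × Int × Int)) (f : Int × Int × PySem.Set Int) :
    List (Int × Int × PySem.Set Int) :=
  (edges.filter (fun e =>
      e.1 == f.1 && !(PySem.Set.contains f.2.2 e.2.1) && e.2.1 != f.1)).map
    (fun e => (e.2.1, f.2.1 + e.2.2, PySem.Set.union f.2.2 [f.1]))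

-- while frontier: … ; the Nat fuel only makes the loop total: every generation grows each
-- frame's frozenset by one node drawn from source/edge targets, so fuel edges.length + 2
-- generations never run out.
def pvGenB (edges : List (Int × Int × Int)) (sink threshold : Int) :
    Nat → List (Int × Int × PySem.Set Int) → Int → Int
  | 0, _, count => count
  | fuel + 1, frontier, count =>
    if frontier.isEmpty then count
    else
      let live := frontier.filter (fun f => f.2.1 < threshold)
      pvGenB edges sink threshold fuel
        ((live.filter (fun f => f.1 != sink)).flatMap (pvExpandB edges))
        (count + ((live.countP (fun f => f.1 == sink) : Nat) : Int))

def eq13a_alt (edges : List (Int × Int × Int)) (source : Int) (sink : Int) (threshold : Int) : Int :=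
  pvGenB edges sink threshold (edges.length + 2) [(source, 0, PySem.Set.empty)] 0

-- ===== PRECONDITION & SPEC =====
def Spec_eq13a (edges : List (Int × Int × Int)) (source : Int) (sink : Int) (threshold : Int) (out : Int) : Prop := out = eq13a_alt edges source sink threshold
instance (edges : List (Int × Int × Int)) (source : Int) (sink : Int) (threshold : Int) (out : Int) : Decidable (Spec_eq13a edges source sink threshold out) := by unfold Spec_eq13a; infer_instance

-- ===== CLAIM (what is proved, stated in full; the proofs are below) =====
def Claim_equal_eq13a : Prop := ∀ (edges : List (Int × Int × Int)) (source : Int) (sink : Int) (threshold : Int), Dom_eq13a edges source sink threshold → Spec_eq13a edges source sink threshold (eq13a edges source sink threshold)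

-- ===== LEMMAS AND PROOFS =====

-- Closed form of A's adjacency lists.
def pvChildren (edges : List (Int × Int × Int)) (u : Int) : List (Int × Int) :=
  (edges.filter (fun e => e.1 == u)).map (fun e => (e.2.1, e.2.2))

-- All nodes a DFS/frontier frame can ever carry: the source and the edge targets.
def pvNodes (edges : List (Int × Int × Int)) (source : Int) : List Int :=
  source :: edges.map (fun e => e.2.1)

-- Number of candidate nodes not yet on the path.
def pvAvail (ns vis : List Int) : Nat := (ns.filter (fun x => !(vis.contains x))).length

lemma pvAdjA_getD (edges : List (Int × Int × Int)) (u : Int) :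
    (pvAdjA edges).getD u [] = pvChildren edges u := by
  have gen : ∀ (es : List (Int × Int × Int)) (d : PySem.Dict Int (List (Int × Int))),
      (es.foldl (fun d e => d.modify e.1 [] (fun l => l ++ [(e.2.1, e.2.2)])) d).getD u []
        = d.getD u [] ++ pvChildren es u := by
    intro es
    induction es with
    | nil => intro d; simp [pvChildren]
    | cons e t ih =>
      intro d
      simp only [List.foldl_cons]
      rw [ih, PySem.Dict.getD_modify]
      by_cases h : u = e.1
      · simp [pvChildren, h]
      · have h' : (e.1 == u) = false := by simp [Ne.symm h]
        simp [pvChildren, h, h']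
  simpa [pvAdjA] using gen edges PySem.Dict.empty

lemma pvFoldl_if_add {α M : Type} [AddCommMonoid M] (p : α → Bool) (g : α → M) :
    ∀ (l : List α) (a : M),
      l.foldl (fun acc x => if p x then acc else acc + g x) a
        = a + ((l.filter (fun x => !p x)).map g).sum := by
  intro l
  induction l with
  | nil => intro a; simp
  | cons x t ih =>
    intro a
    by_cases hp : p x = true
    · simp [List.foldl_cons, hp, ih]
    · simp only [Bool.not_eq_true] at hp
      simp [List.foldl_cons, hp, ih, add_assoc]

lemma pvFilter_len_lt {α : Type} (p q : α → Bool) (ns : List α)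
    (hpq : ∀ y, q y = true → p y = true) (x : α) (hx : x ∈ ns)
    (hp : p x = true) (hq : q x = false) :
    (ns.filter q).length < (ns.filter p).length := by
  have mono : ∀ (t : List α), (t.filter q).length ≤ (t.filter p).length := by
    intro t
    induction t with
    | nil => simp
    | cons y t ih =>
      by_cases hq' : q y = true
      · simp [hq', hpq y hq', ih]
      · simp only [Bool.not_eq_true] at hq'
        by_cases hp' : p y = true
        · simp [hq', hp']; omega
        · simp only [Bool.not_eq_true] at hp'
          simp [hq', hp', ih]
  induction ns with
  | nil => cases hx
  | cons y t ih =>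
    rcases List.mem_cons.mp hx with h | h
    · subst h
      simp [hp, hq]
      exact mono t
    · by_cases hq' : q y = true
      · simp [hq', hpq y hq']
        exact ih h
      · simp only [Bool.not_eq_true] at hq'
        by_cases hp' : p y = true
        · simp [hq', hp']
          exact le_of_lt (ih h)
        · simp only [Bool.not_eq_true] at hp'
          simp [hq', hp']
          exact ih h

lemma pvAvail_add_lt (ns vis : List Int) (u : Int) (hu : u ∈ ns)
    (hnot : vis.contains u = false) :
    pvAvail ns (PySem.Set.add vis u) < pvAvail ns vis := by
  have hmem : u ∉ vis := by simpa using hnot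
  rw [PySem.Set.add_of_not_mem hmem]
  unfold pvAvail
  apply pvFilter_len_lt (fun x => !vis.contains x) (fun x => !((vis ++ [u]).contains x)) ns _ u hu
  · simpa using hmem
  · simp
  · intro y hy
    simp only [Bool.not_eq_true'] at hy ⊢
    simp only [List.contains_append] at hy
    exact (Bool.or_eq_false_iff.mp hy).1

lemma pvMem_children {edges : List (Int × Int × Int)} {u : Int} {vw : Int × Int}
    (h : vw ∈ pvChildren edges u) (source : Int) : vw.1 ∈ pvNodes edges source := by
  unfold pvChildren at h
  rcases List.mem_map.mp h with ⟨e, he, rfl⟩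
  have := List.mem_of_mem_filter he
  exact List.mem_cons_of_mem _ (List.mem_map.mpr ⟨e, this, rfl⟩)

lemma pvUnion_singleton (vis : PySem.Set Int) (u : Int) :
    PySem.Set.union vis [u] = PySem.Set.add vis u := by
  rfl

lemma pvDfsA_succ (adj : PySem.Dict Int (List (Int × Int))) (sink threshold : Int)
    (fuel : Nat) (u weight : Int) (path : PySem.Set Int) :
    pvDfsA adj sink threshold (fuel + 1) u weight path
      = if threshold ≤ weight then 0
        else if u = sink then 1
        else
          (adj.getD u []).foldl
            (fun acc vw =>
              if PySem.Set.contains (PySem.Set.add path u) vw.1 then acc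
              else acc + pvDfsA adj sink threshold fuel vw.1 (weight + vw.2)
                (PySem.Set.add path u)) 0 := rfl

-- Fuel irrelevance for the DFS: any fuel above the number of available nodes gives the same value.
lemma pvDfs_fuel (edges : List (Int × Int × Int)) (source sink threshold : Int) :
    ∀ (f₁ f₂ : Nat) (u weight : Int) (vis : PySem.Set Int),
      u ∈ pvNodes edges source → vis.contains u = false →
      pvAvail (pvNodes edges source) vis < f₁ → pvAvail (pvNodes edges source) vis < f₂ →
      pvDfsA (pvAdjA edges) sink threshold f₁ u weight vis
        = pvDfsA (pvAdjA edges) sink threshold f₂ u weight vis := by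
  intro f₁
  induction f₁ with
  | zero => intro f₂ u w vis _ _ h1 _; omega
  | succ n ih =>
    intro f₂ u w vis hu hnv h1 h2
    cases f₂ with
    | zero => omega
    | succ m =>
      simp only [pvDfsA]
      by_cases hw : threshold ≤ w
      · simp [hw]
      · by_cases hs : u = sink
        · simp [hw, hs]
        · simp only [if_neg hw, if_neg hs]
          rw [pvFoldl_if_add, pvFoldl_if_add]
          simp only [zero_add]
          congr 1
          refine List.map_congr_left ?_
          intro vw hvw
          have hmemadj : vw ∈ (pvAdjA edges).getD u [] := List.mem_of_mem_filter hvw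
          have hfilt : (PySem.Set.add vis u).contains vw.1 = false := by
            have := List.of_mem_filter hvw
            simpa using this
          have hmemc : vw.1 ∈ pvNodes edges source := by
            rw [pvAdjA_getD] at hmemadj
            exact pvMem_children hmemadj source
          have hlt := pvAvail_add_lt (pvNodes edges source) vis u hu hnv
          exact ih m vw.1 (w + vw.2) (PySem.Set.add vis u) hmemc hfilt (by omega) (by omega)

-- Canonical (fuel-free) value of a frame: what A's DFS returns from this state.
def pvCnt (edges : List (Int × Int × Int)) (source sink threshold : Int)
    (u weight : Int) (vis : PySem.Set Int) : Int :=
  pvDfsA (pvAdjA edges) sink threshold (pvAvail (pvNodes edges source) vis + 1) u weight vis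

-- Frame validity: node among the candidate nodes, not yet on its own path.
def pvValid (edges : List (Int × Int × Int)) (source : Int)
    (f : Int × Int × PySem.Set Int) : Prop :=
  f.1 ∈ pvNodes edges source ∧ (f.2.2 : List Int).contains f.1 = false

-- Per-frame unfolding of pvCnt in the three cases of one generation.
lemma pvCnt_dead (edges : List (Int × Int × Int)) (source sink threshold : Int)
    (u w : Int) (vis : PySem.Set Int) (hw : ¬ w < threshold) :
    pvCnt edges source sink threshold u w vis = 0 := by
  simp [pvCnt, pvDfsA, le_of_not_gt hw]

lemma pvCnt_sink (edges : List (Int × Int × Int)) (source sink threshold : Int)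
    (w : Int) (vis : PySem.Set Int) (hw : w < threshold) :
    pvCnt edges source sink threshold sink w vis = 1 := by
  simp [pvCnt, pvDfsA, not_le_of_gt hw]

lemma pvCnt_expand (edges : List (Int × Int × Int)) (source sink threshold : Int)
    (f : Int × Int × PySem.Set Int) (hv : pvValid edges source f)
    (hw : f.2.1 < threshold) (hs : f.1 ≠ sink) :
    pvCnt edges source sink threshold f.1 f.2.1 f.2.2
      = ((pvExpandB edges f).map
          (fun g => pvCnt edges source sink threshold g.1 g.2.1 g.2.2)).sum := by
  obtain ⟨u, w, vis⟩ := f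
  obtain ⟨hu, hnv⟩ := hv
  simp only at hu hnv hw hs ⊢
  have hmem : u ∉ vis := by simpa using hnv
  have hlt := pvAvail_add_lt (pvNodes edges source) vis u hu hnv
  -- the two filtered child lists coincide (up to the projection (v, wt))
  have hlist : ((pvChildren edges u).filter
        (fun vw => !(PySem.Set.add vis u).contains vw.1))
      = (edges.filter (fun e =>
          e.1 == u && !(PySem.Set.contains vis e.2.1) && e.2.1 != u)).map
        (fun e => (e.2.1, e.2.2)) := by
    unfold pvChildren
    rw [List.filter_map, List.filter_filter]
    refine congrArg _ (List.filter_congr ?_)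
    intro e _
    rw [PySem.Set.add_of_not_mem hmem]
    simp only [Function.comp_def, PySem.Set.contains, List.contains_append]
    cases h1 : (e.1 == u) <;> cases h2 : vis.contains e.2.1 <;>
      cases h3 : (e.2.1 == u) <;> simp_all [bne]
  -- unfold one step of the DFS on the left only
  conv_lhs => rw [pvCnt, pvDfsA_succ]
  rw [if_neg (not_le_of_gt hw), if_neg hs, pvAdjA_getD, pvFoldl_if_add, zero_add, hlist]
  unfold pvExpandB
  simp only [List.map_map, Function.comp_def, pvUnion_singleton]
  refine congrArg _ (List.map_congr_left ?_)
  intro e he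
  have hepq := List.of_mem_filter he
  simp only [Bool.and_eq_true, bne_iff_ne] at hepq
  have hvc : vis.contains e.2.1 = false := by
    have := hepq.1.2 ; simpa using this
  have hnc : (PySem.Set.add vis u).contains e.2.1 = false := by
    rw [PySem.Set.add_of_not_mem hmem]
    have hnvm : e.2.1 ∉ vis := by simpa using hvc
    simp [PySem.Set.contains, hnvm, hepq.2]
  have hmemc : e.2.1 ∈ pvNodes edges source :=
    List.mem_cons_of_mem _ (List.mem_map.mpr ⟨e, List.mem_of_mem_filter he, rfl⟩)
  simp only [pvCnt]
  exact pvDfs_fuel edges source sink threshold _ _ e.2.1 (w + e.2.2) (PySem.Set.add vis u)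
    hmemc hnc (by omega) (by omega)

-- Children of a valid live non-sink frame are valid and strictly smaller in pvAvail.
lemma pvExpand_valid (edges : List (Int × Int × Int)) (source : Int)
    (f : Int × Int × PySem.Set Int) (hv : pvValid edges source f)
    (g : Int × Int × PySem.Set Int) (hg : g ∈ pvExpandB edges f) :
    pvValid edges source g ∧
      pvAvail (pvNodes edges source) g.2.2 < pvAvail (pvNodes edges source) f.2.2 := by
  obtain ⟨u, w, vis⟩ := f
  obtain ⟨hu, hnv⟩ := hv
  simp only at hu hnv
  unfold pvExpandB at hg
  rcases List.mem_map.mp hg with ⟨e, he, rfl⟩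
  have hepq := (List.of_mem_filter he)
  simp only [Bool.and_eq_true, bne_iff_ne] at hepq
  have hmem : u ∉ vis := by simpa using hnv
  have hvc : vis.contains e.2.1 = false := by
    have := hepq.1.2
    simpa using this
  refine ⟨⟨?_, ?_⟩, ?_⟩
  · exact List.mem_cons_of_mem _ (List.mem_map.mpr ⟨e, List.mem_of_mem_filter he, rfl⟩)
  · simp only [pvUnion_singleton]
    rw [PySem.Set.add_of_not_mem hmem]
    have hnvm : e.2.1 ∉ vis := by simpa using hvc
    simp [PySem.Set.contains, hnvm, hepq.2]
  · simp only [pvUnion_singleton]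
    exact pvAvail_add_lt (pvNodes edges source) vis u hu hnv

-- One generation: the frontier's total DFS value splits into the sink hits of its live part
-- plus the total value of the expanded frontier.
lemma pvGen_step (edges : List (Int × Int × Int)) (source sink threshold : Int) :
    ∀ (fr : List (Int × Int × PySem.Set Int)),
      (∀ f ∈ fr, pvValid edges source f) →
      (fr.map (fun f => pvCnt edges source sink threshold f.1 f.2.1 f.2.2)).sum
        = (((fr.filter (fun f => f.2.1 < threshold)).countP (fun f => f.1 == sink) : Nat) : Int)
          + ((((fr.filter (fun f => f.2.1 < threshold)).filter (fun f => f.1 != sink)).flatMap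
                (pvExpandB edges)).map
              (fun f => pvCnt edges source sink threshold f.1 f.2.1 f.2.2)).sum := by
  intro fr
  induction fr with
  | nil => intro _; simp
  | cons f t ih =>
    intro hv
    have hvf := hv f List.mem_cons_self
    have iht := ih (fun g hg => hv g (List.mem_cons_of_mem _ hg))
    by_cases hw : f.2.1 < threshold
    · by_cases hs : f.1 = sink
      · have hc : pvCnt edges source sink threshold f.1 f.2.1 f.2.2 = 1 := by
          conv_lhs => rw [hs]
          exact pvCnt_sink edges source sink threshold f.2.1 f.2.2 hw
        rw [List.map_cons, List.sum_cons, hc,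
          List.filter_cons_of_pos (by simpa using hw),
          List.countP_cons_of_pos (p := fun g : Int × Int × PySem.Set Int => g.1 == sink) (by simpa using hs),
          List.filter_cons_of_neg (by simp [hs]), iht]
        push_cast
        ring
      · have hc := pvCnt_expand edges source sink threshold f hvf hw hs
        rw [List.map_cons, List.sum_cons, hc,
          List.filter_cons_of_pos (by simpa using hw),
          List.countP_cons_of_neg (p := fun g : Int × Int × PySem.Set Int => g.1 == sink) (by simpa using hs),
          List.filter_cons_of_pos (by simpa using hs),
          List.flatMap_cons, List.map_append, List.sum_append, iht]
        ring
    · have hc := pvCnt_dead edges source sink threshold f.1 f.2.1 f.2.2 hw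
      rw [List.map_cons, List.sum_cons, hc,
        List.filter_cons_of_neg (by simpa using hw), iht]
      ring

-- Main loop invariant: with fuel above every frame's pvAvail, the generation loop adds the
-- total DFS value of the frontier.
lemma pvGen_sum (edges : List (Int × Int × Int)) (source sink threshold : Int) :
    ∀ (n : Nat) (fr : List (Int × Int × PySem.Set Int)) (c : Int),
      (∀ f ∈ fr, pvValid edges source f ∧ pvAvail (pvNodes edges source) f.2.2 < n) →
      pvGenB edges sink threshold n fr c
        = c + (fr.map (fun f => pvCnt edges source sink threshold f.1 f.2.1 f.2.2)).sum := by
  intro n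
  induction n with
  | zero =>
    intro fr c h
    cases fr with
    | nil => simp [pvGenB]
    | cons f t => exact absurd (h f List.mem_cons_self).2 (by omega)
  | succ n ih =>
    intro fr c h
    by_cases hemp : fr = []
    · subst hemp; simp [pvGenB]
    · have hne : fr.isEmpty = false := by simp [hemp]
      simp only [pvGenB, hne, Bool.false_eq_true, if_neg, not_false_iff]
      rw [ih _ _ ?_]
      · rw [pvGen_step edges source sink threshold fr (fun f hf => (h f hf).1)]
        ring
      · intro g hg
        rcases List.mem_flatMap.mp hg with ⟨f, hf, hgf⟩
        have hfmem : f ∈ fr := List.mem_of_mem_filter (List.mem_of_mem_filter hf)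
        obtain ⟨hvf, hlt⟩ := h f hfmem
        obtain ⟨hvg, hglt⟩ := pvExpand_valid edges source f hvf g hgf
        exact ⟨hvg, by omega⟩

-- ===== VERDICT (by name: the statement is the Claim_ definition above) =====
theorem eq13a_spec : Claim_equal_eq13a := by
  intro edges source sink threshold _
  unfold Spec_eq13a eq13a eq13a_alt
  have hempty : pvAvail (pvNodes edges source) PySem.Set.empty = edges.length + 1 := by
    simp [pvAvail, pvNodes, PySem.Set.empty]
  rw [pvGen_sum edges source sink threshold _ _ 0 ?_]
  · simp only [List.map_cons, List.map_nil, List.sum_cons, List.sum_nil, add_zero, zero_add]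
    unfold pvCnt
    rw [hempty]
  · intro f hf
    simp only [List.mem_singleton] at hf
    subst hf
    exact ⟨⟨List.mem_cons_self, rfl⟩, by rw [hempty]; omega⟩
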